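-- pv_equiv track=rewrite | github.com/youcefyouc06-create/REDDITPULSE | validate_idea.py | has_idea_specificity
-- ===== SOURCE A (Python) =====
-- SEMANTIC_GROUPS = {
--     "construction_domain": ["construction", "contractor", "contractors", "builder", "builders", "building", "jobsite", "civilengineering", "homebuilding"],
--     "finance_function": ["expense", "expenses", "receipt", "receipts", "report", "reports", "invoice", "invoices", "cost", "costs", "payment", "payments", "budget", "budgets", "reimbursement", "reimbursements"],
--     "automation_method": ["automation", "automate", "automated", "tracking", "track", "management", "manage", "software", "app", "apps", "tool", "tools"],
--     "hr_domain": ["hr", "human resources", "recruiting", "onboarding", "employee", "workforce", "people ops"],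
--     "legal_domain": ["legal", "lawyer", "law firm", "attorney", "paralegal", "litigation", "compliance"],
--     "freelance_domain": ["freelance", "freelancer", "freelancers", "client", "clients", "agency"],
--     "restaurant_domain": ["restaurant", "restaurants", "kitchen", "cafe", "hospitality", "menu", "dining", "food service"],
--     "realestate_domain": ["real estate", "property", "landlord", "tenant", "leasing", "broker", "agent"],
-- }
--
-- def _active_semantic_groups(idea_text, keywords):
--     haystack = " ".join([str(idea_text or "")] + [str(kw or "") for kw in (keywords or [])]).lower()
--     active = {}
--     for group_name, terms in SEMANTIC_GROUPS.items():
--         if any(term in haystack for term in terms):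
--             active[group_name] = list(terms)
--     return active
--
-- def _matched_semantic_groups(text, idea_text, keywords):
--     text_lower = str(text or "").lower()
--     active = _active_semantic_groups(idea_text, keywords)
--     matched = {}
--     for group_name, terms in active.items():
--         hits = [term for term in terms if term in text_lower]
--         if hits:
--             matched[group_name] = hits
--     return matched
--
-- def has_idea_specificity(title, idea_text, keywords):
--     """
--     Returns True only if the title contains terms from at least two
--     different semantic groups from the idea context.
--     """
--     matched_groups = _matched_semantic_groups(title, idea_text, keywords)
--     if len(matched_groups) < 2:
--         return False
--
--     title_lower = str(title or "").lower()
--     active = _active_semantic_groups(idea_text, keywords)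
--
--     construction_active = "construction_domain" in active
--     finance_active = "finance_function" in active
--     if construction_active and finance_active:
--         has_construction = any(term in title_lower for term in active["construction_domain"])
--         has_finance = any(term in title_lower for term in active["finance_function"])
--         if not (has_construction and has_finance):
--             return False
--
--     return True
-- ===== SOURCE B (Python) =====
-- SEMANTIC_GROUPS = {
--     "construction_domain": ["construction", "contractor", "contractors", "builder", "builders", "building", "jobsite", "civilengineering", "homebuilding"],
--     "finance_function": ["expense", "expenses", "receipt", "receipts", "report", "reports", "invoice", "invoices", "cost", "costs", "payment", "payments", "budget", "budgets", "reimbursement", "reimbursements"],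
--     "automation_method": ["automation", "automate", "automated", "tracking", "track", "management", "manage", "software", "app", "apps", "tool", "tools"],
--     "hr_domain": ["hr", "human resources", "recruiting", "onboarding", "employee", "workforce", "people ops"],
--     "legal_domain": ["legal", "lawyer", "law firm", "attorney", "paralegal", "litigation", "compliance"],
--     "freelance_domain": ["freelance", "freelancer", "freelancers", "client", "clients", "agency"],
--     "restaurant_domain": ["restaurant", "restaurants", "kitchen", "cafe", "hospitality", "menu", "dining", "food service"],
-- }
-- SEMANTIC_GROUPS["realestate_domain"] = ["real estate", "property", "landlord", "tenant", "leasing", "broker", "agent"]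
--
-- # Flat term -> group index, built once: the data is inverted from a group->terms
-- # table into one list of (term, group) pairs.
-- _TERM_INDEX = [(term, group) for group, terms in SEMANTIC_GROUPS.items() for term in terms]
--
-- def has_idea_specificity(title, idea_text, keywords):
--     # Term-major single pass over the inverted index, collecting the group-name
--     # sets as set algebra; matched groups = active & title-hit, by intersection.
--     hay = " ".join([str(idea_text or "")] + [str(kw or "") for kw in (keywords or [])]).lower()
--     tl = str(title or "").lower()
--     active = set()
--     in_title = set()
--     for term, group in _TERM_INDEX:
--         if term in hay:
--             active.add(group)
--         if term in tl:
--             in_title.add(group)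
--     matched = active & in_title
--     if len(matched) < 2:
--         return False
--     if "construction_domain" in active and "finance_function" in active:
--         return "construction_domain" in matched and "finance_function" in matched
--     return True
-- ===== Notes on version B (the rewrite author's own statement) =====
-- stated objective: alternative
-- what changed: Inverts the data structure: instead of A's group-major three-function pipeline building dicts of hit lists (and computing the active groups twice), B builds a flat term->group index once and makes a single term-major pass accumulating two sets of group names, with matched = active & in_title by set intersection and the special case a membership test on those sets.
import Mathlib
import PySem

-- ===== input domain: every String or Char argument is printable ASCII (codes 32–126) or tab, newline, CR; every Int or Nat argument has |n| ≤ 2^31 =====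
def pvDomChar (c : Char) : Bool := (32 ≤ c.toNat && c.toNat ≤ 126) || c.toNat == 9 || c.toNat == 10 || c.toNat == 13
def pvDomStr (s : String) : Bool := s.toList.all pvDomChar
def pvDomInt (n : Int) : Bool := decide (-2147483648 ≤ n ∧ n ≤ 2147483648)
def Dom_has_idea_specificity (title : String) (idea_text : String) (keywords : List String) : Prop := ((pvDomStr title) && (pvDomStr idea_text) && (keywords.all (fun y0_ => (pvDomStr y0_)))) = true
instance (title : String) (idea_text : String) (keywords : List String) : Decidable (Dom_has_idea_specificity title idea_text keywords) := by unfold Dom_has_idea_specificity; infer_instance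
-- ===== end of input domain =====

-- B inverts A's group-major dict pipeline into a flat term->group index scanned once,
-- accumulating active/in-title group-name SETS; matched = active ∩ in_title; objective: alternative.


-- ===== PORT A =====
def semanticGroups : List (String × List String) := [
  ("construction_domain", ["construction", "contractor", "contractors", "builder", "builders", "building", "jobsite", "civilengineering", "homebuilding"]),
  ("finance_function", ["expense", "expenses", "receipt", "receipts", "report", "reports", "invoice", "invoices", "cost", "costs", "payment", "payments", "budget", "budgets", "reimbursement", "reimbursements"]),
  ("automation_method", ["automation", "automate", "automated", "tracking", "track", "management", "manage", "software", "app", "apps", "tool", "tools"]),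
  ("hr_domain", ["hr", "human resources", "recruiting", "onboarding", "employee", "workforce", "people ops"]),
  ("legal_domain", ["legal", "lawyer", "law firm", "attorney", "paralegal", "litigation", "compliance"]),
  ("freelance_domain", ["freelance", "freelancer", "freelancers", "client", "clients", "agency"]),
  ("restaurant_domain", ["restaurant", "restaurants", "kitchen", "cafe", "hospitality", "menu", "dining", "food service"]),
  ("realestate_domain", ["real estate", "property", "landlord", "tenant", "leasing", "broker", "agent"])]

-- Python dict with the 8 distinct literal keys inserted once each: association list built by
-- appending, exact in insertion order ('x or ""' / 'keywords or []' are identities on typed inputs).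
def activeSemanticGroups (idea_text : String) (keywords : List String) : List (String × List String) :=
  let haystack := PySem.Str.lower (PySem.Str.join " " (idea_text :: keywords))
  semanticGroups.foldl (fun acc g =>
    if g.2.any (fun term => PySem.Str.isIn term haystack) then acc ++ [(g.1, g.2)] else acc) []

def matchedSemanticGroups (text : String) (idea_text : String) (keywords : List String) : List (String × List String) :=
  let textLower := PySem.Str.lower text
  let active := activeSemanticGroups idea_text keywords
  active.foldl (fun acc g =>
    let hits := g.2.filter (fun term => PySem.Str.isIn term textLower)
    if hits ≠ [] then acc ++ [(g.1, hits)] else acc) []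

def has_idea_specificity (title : String) (idea_text : String) (keywords : List String) : Bool :=
  let matched := matchedSemanticGroups title idea_text keywords
  if matched.length < 2 then false
  else
    let titleLower := PySem.Str.lower title
    let active := activeSemanticGroups idea_text keywords
    let constructionActive := (List.lookup "construction_domain" active).isSome
    let financeActive := (List.lookup "finance_function" active).isSome
    if constructionActive && financeActive then
      -- active["…"]: the guard makes the key present, so getD [] never takes its default
      let hasConstruction := ((List.lookup "construction_domain" active).getD []).any (fun term => PySem.Str.isIn term titleLower)
      let hasFinance := ((List.lookup "finance_function" active).getD []).any (fun term => PySem.Str.isIn term titleLower)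
      if !(hasConstruction && hasFinance) then false else true
    else true

-- ===== PORT B =====
-- flat term -> group index ( _TERM_INDEX comprehension )
def termIndex : List (String × String) :=
  semanticGroups.flatMap (fun g => g.2.map (fun term => (term, g.1)))

def has_idea_specificity_alt (title : String) (idea_text : String) (keywords : List String) : Bool :=
  let hay := PySem.Str.lower (PySem.Str.join " " (idea_text :: keywords))
  let tl := PySem.Str.lower title
  let st := termIndex.foldl (fun (acc : PySem.Set String × PySem.Set String) p =>
      (if PySem.Str.isIn p.1 hay then PySem.Set.add acc.1 p.2 else acc.1,
       if PySem.Str.isIn p.1 tl then PySem.Set.add acc.2 p.2 else acc.2))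
    (PySem.Set.empty, PySem.Set.empty)
  let matched := PySem.Set.inter st.1 st.2
  if matched.length < 2 then false
  else if PySem.Set.contains st.1 "construction_domain" && PySem.Set.contains st.1 "finance_function" then
    PySem.Set.contains matched "construction_domain" && PySem.Set.contains matched "finance_function"
  else true

-- ===== PRECONDITION & SPEC =====
def Spec_has_idea_specificity (title : String) (idea_text : String) (keywords : List String) (out : Bool) : Prop := out = has_idea_specificity_alt title idea_text keywords
instance (title : String) (idea_text : String) (keywords : List String) (out : Bool) : Decidable (Spec_has_idea_specificity title idea_text keywords out) := by unfold Spec_has_idea_specificity; infer_instance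

-- ===== CLAIM (what is proved, stated in full; the proofs are below) =====
def Claim_equal_has_idea_specificity : Prop := ∀ (title : String) (idea_text : String) (keywords : List String), Dom_has_idea_specificity title idea_text keywords → Spec_has_idea_specificity title idea_text keywords (has_idea_specificity title idea_text keywords)

-- ===== LEMMAS AND PROOFS =====

-- 'if hits:' — a filtered list is nonempty exactly when some element passes
theorem pv_filter_ne_nil {α} (l : List α) (p : α → Bool) :
    (decide ¬(l.filter p = [])) = l.any p := by
  cases hb : l.any p
  · simp_all [List.filter_eq_nil_iff, List.any_eq_false]
  · simp_all [List.filter_eq_nil_iff, List.any_eq_true]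

-- association-list lookup commutes with filtering when keys are distinct
theorem pv_lookup_filter {β} (l : List (String × β)) (p : String × β → Bool) (k : String)
    (v : β) (hnd : (l.map Prod.fst).Nodup) (hv : (k, v) ∈ l) :
    List.lookup k (l.filter p) = if p (k, v) then some v else none := by
  induction l with
  | nil => cases hv
  | cons a t ih =>
    rw [List.map_cons, List.nodup_cons] at hnd
    rcases List.mem_cons.mp hv with h | h
    · subst h
      by_cases hp : p (k, v) = true
      · simp [hp]
      · simp only [Bool.not_eq_true] at hp
        have : List.lookup k (t.filter p) = none := by
          rw [List.lookup_eq_none_iff]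
          intro x hx
          have hxk : x.1 ≠ k := fun he => hnd.1 (List.mem_map.mpr ⟨x, List.mem_of_mem_filter hx, he⟩)
          simp only [bne_iff_ne, Ne]
          exact fun h => hxk h.symm
        simp [hp, this]
    · have hk : (k == a.1) = false := by
        apply beq_eq_false_iff_ne.mpr
        intro he
        apply hnd.1
        rw [← he]
        exact List.mem_map_of_mem h
      have ht := ih hnd.2 h
      by_cases hp : p a = true <;> simp [hp, List.lookup, hk, ht]

-- distinct keys: a pair of l whose key equals k IS the pair (k, v)
theorem pv_key_unique {β} {l : List (String × β)} (hnd : (l.map Prod.fst).Nodup)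
    {k : String} {v : β} {x : String × β} (hv : (k, v) ∈ l) (hx : x ∈ l) (hk : x.1 = k) :
    x = (k, v) := by
  induction l with
  | nil => cases hv
  | cons a t ih =>
    rw [List.map_cons, List.nodup_cons] at hnd
    rcases List.mem_cons.mp hv with h1 | h1 <;> rcases List.mem_cons.mp hx with h2 | h2
    · rw [h2, ← h1]
    · exfalso
      apply hnd.1
      have ha : a.1 = k := by rw [← h1]
      rw [ha, ← hk]
      exact List.mem_map_of_mem h2
    · exfalso
      apply hnd.1
      rw [h2] at hk
      rw [hk]
      exact List.mem_map_of_mem h1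
    · exact ih hnd.2 h1 h2

-- membership in the name list of a filtered group table
theorem pv_mem_map_fst_filter (p : String × List String → Bool) (y : String) :
    y ∈ (semanticGroups.filter p).map Prod.fst ↔ ∃ g ∈ semanticGroups, p g ∧ g.1 = y := by
  simp only [List.mem_map, List.mem_filter]
  constructor
  · rintro ⟨g, ⟨hg, hp⟩, he⟩; exact ⟨g, hg, hp, he⟩
  · rintro ⟨g, hg, hp, he⟩; exact ⟨g, ⟨hg, hp⟩, he⟩

-- membership in the filtered flat term index, read back group-wise
theorem pv_mem_map_snd_filter_termIndex (c : String × String → Bool) (y : String) :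
    y ∈ ((termIndex.filter c).map Prod.snd) ↔
      ∃ g ∈ semanticGroups, (∃ t ∈ g.2, c (t, g.1)) ∧ g.1 = y := by
  simp only [termIndex, List.mem_map, List.mem_filter, List.mem_flatMap]
  constructor
  · rintro ⟨p, ⟨⟨g, hg, hp⟩, hc⟩, he⟩
    rcases hp with ⟨t, ht, hte⟩
    subst hte
    exact ⟨g, hg, ⟨t, ht, hc⟩, he⟩
  · rintro ⟨g, hg, ⟨t, ht, hc⟩, he⟩
    exact ⟨(t, g.1), ⟨⟨g, hg, ⟨t, ht, rfl⟩⟩, hc⟩, he⟩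

-- B's fold of conditional set-adds = ofList of the filtered index's group names
theorem pv_fold_add_eq_ofList (c : String × String → Bool) :
    termIndex.foldl (fun (s : PySem.Set String) p => if c p then PySem.Set.add s p.2 else s) PySem.Set.empty
      = PySem.Set.ofList ((termIndex.filter c).map Prod.snd) := by
  rw [PySem.List.foldl_if_eq_foldl_filter]
  rw [← PySem.Set.update_map_eq_foldl_add]
  exact PySem.Set.update_nil_left _

-- the two-accumulator loop, split and closed in one step (hay, tl abstract)
theorem pv_fold_pair (hay tl : String) :
    termIndex.foldl (fun (acc : PySem.Set String × PySem.Set String) p =>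
      (if PySem.Str.isIn p.1 hay then PySem.Set.add acc.1 p.2 else acc.1,
       if PySem.Str.isIn p.1 tl then PySem.Set.add acc.2 p.2 else acc.2))
      (PySem.Set.empty, PySem.Set.empty)
    = (PySem.Set.ofList ((termIndex.filter (fun p => PySem.Str.isIn p.1 hay)).map Prod.snd),
       PySem.Set.ofList ((termIndex.filter (fun p => PySem.Str.isIn p.1 tl)).map Prod.snd)) := by
  rw [PySem.List.foldl_prod_mk
    (f := fun (acc : PySem.Set String) (p : String × String) =>
      if PySem.Str.isIn p.1 hay then PySem.Set.add acc p.2 else acc)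
    (g := fun (acc : PySem.Set String) (p : String × String) =>
      if PySem.Str.isIn p.1 tl then PySem.Set.add acc p.2 else acc)]
  rw [pv_fold_add_eq_ofList, pv_fold_add_eq_ofList]

-- ===== VERDICT (by name: the statement is the Claim_ definition above) =====
-- the unique group named k lets the group-wise ∃ collapse to that group's terms
theorem pv_exists_group (R : String × List String → Prop) (k : String) (v : List String)
    (hv : (k, v) ∈ semanticGroups) :
    (∃ g ∈ semanticGroups, R g ∧ g.1 = k) ↔ R (k, v) := by
  constructor
  · rintro ⟨g, hg, hR, hk⟩
    have he := pv_key_unique (l := semanticGroups) (by decide) hv hg hk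
    rwa [he] at hR
  · intro h; exact ⟨(k, v), hv, h, rfl⟩

-- Bool form of set membership
theorem pv_contains_eq {s : PySem.Set String} {y : String} {b : Bool} (h : y ∈ s ↔ b = true) :
    PySem.Set.contains s y = b := by
  have hci : (PySem.Set.contains s y = true) ↔ y ∈ s := PySem.Set.contains_iff s y
  cases b
  · apply Bool.eq_false_iff.mpr
    intro hc
    exact Bool.false_ne_true (h.mp (hci.mp hc))
  · exact hci.mpr (h.mpr rfl)

set_option maxHeartbeats 4000000 in
theorem has_idea_specificity_spec : Claim_equal_has_idea_specificity := by
  intro title idea_text keywords _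
  unfold Spec_has_idea_specificity has_idea_specificity has_idea_specificity_alt
    matchedSemanticGroups activeSemanticGroups
  simp only [PySem.List.foldl_append_if, PySem.List.foldl_append_ite,
    List.nil_append, Prod.mk.eta, List.map_id', pv_filter_ne_nil, List.filter_filter,
    List.length_map]
  generalize PySem.Str.lower (PySem.Str.join " " (idea_text :: keywords)) = hay
  generalize PySem.Str.lower title = tl
  rw [pv_fold_pair]
  dsimp only
  set SH := PySem.Set.ofList (List.map Prod.snd (List.filter (fun p => PySem.Str.isIn p.1 hay) termIndex)) with hSH
  set ST := PySem.Set.ofList (List.map Prod.snd (List.filter (fun p => PySem.Str.isIn p.1 tl) termIndex)) with hST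
  set I := PySem.Set.inter SH ST with hI
  -- membership characterisations of B's sets
  have hmemH : ∀ y, y ∈ SH ↔ ∃ g ∈ semanticGroups, (∃ t ∈ g.2, PySem.Str.isIn t hay = true) ∧ g.1 = y := by
    intro y
    rw [hSH, PySem.Set.mem_ofList,
      pv_mem_map_snd_filter_termIndex (c := fun p => PySem.Str.isIn p.1 hay) y]
  have hmemT : ∀ y, y ∈ ST ↔ ∃ g ∈ semanticGroups, (∃ t ∈ g.2, PySem.Str.isIn t tl = true) ∧ g.1 = y := by
    intro y
    rw [hST, PySem.Set.mem_ofList,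
      pv_mem_map_snd_filter_termIndex (c := fun p => PySem.Str.isIn p.1 tl) y]
  have hmemI : ∀ y, y ∈ I ↔ ∃ g ∈ semanticGroups,
      ((∃ t ∈ g.2, PySem.Str.isIn t hay = true) ∧ (∃ t ∈ g.2, PySem.Str.isIn t tl = true)) ∧ g.1 = y := by
    intro y
    rw [hI, PySem.Set.mem_inter, hmemH y, hmemT y]
    constructor
    · rintro ⟨⟨g1, hg1, hR1, hk1⟩, ⟨g2, hg2, hR2, hk2⟩⟩
      have he : g2 = (g1.1, g1.2) :=
        pv_key_unique (l := semanticGroups) (by decide) (by simpa using hg1) hg2 (hk2.trans hk1.symm)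
      rw [Prod.mk.eta] at he
      rw [he] at hR2
      exact ⟨g1, hg1, ⟨hR1, hR2⟩, hk1⟩
    · rintro ⟨g, hg, ⟨h1, h2⟩, hk⟩
      exact ⟨⟨g, hg, h1, hk⟩, ⟨g, hg, h2, hk⟩⟩
  -- length of the intersection = number of groups active-and-matched
  have hmemI' : ∀ y, y ∈ I ↔ y ∈ (semanticGroups.filter
      (fun a => (a.2.any fun term => PySem.Str.isIn term hay) && a.2.any fun term => PySem.Str.isIn term tl)).map Prod.fst := by
    intro y
    rw [hmemI y, pv_mem_map_fst_filter]
    refine exists_congr fun g => and_congr_right fun _ => and_congr_left fun _ => ?_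
    simp [List.any_eq_true]
  have hndI : I.Nodup := PySem.Set.nodup_inter SH ST (PySem.Set.nodup_ofList _)
  have hndM : ((semanticGroups.filter
      (fun a => (a.2.any fun term => PySem.Str.isIn term hay) && a.2.any fun term => PySem.Str.isIn term tl)).map Prod.fst).Nodup :=
    List.Nodup.sublist (List.Sublist.map Prod.fst List.filter_sublist) (by decide)
  have hlen : I.length = (semanticGroups.filter
      (fun a => (a.2.any fun term => PySem.Str.isIn term hay) && a.2.any fun term => PySem.Str.isIn term tl)).length := by
    have hp := (List.perm_ext_iff_of_nodup hndI hndM).mpr hmemI'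
    rw [hp.length_eq, List.length_map]
  -- the four contains tests, as the group-level any tests
  have hca : PySem.Set.contains SH "construction_domain" =
      (List.any ["construction", "contractor", "contractors", "builder", "builders", "building", "jobsite", "civilengineering", "homebuilding"] fun term => PySem.Str.isIn term hay) := by
    apply pv_contains_eq
    rw [hmemH _, pv_exists_group _ "construction_domain" ["construction", "contractor", "contractors", "builder", "builders", "building", "jobsite", "civilengineering", "homebuilding"] (by decide)]
    exact (List.any_eq_true).symm
  have hfa : PySem.Set.contains SH "finance_function" =
      (List.any ["expense", "expenses", "receipt", "receipts", "report", "reports", "invoice", "invoices", "cost", "costs", "payment", "payments", "budget", "budgets", "reimbursement", "reimbursements"] fun term => PySem.Str.isIn term hay) := by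
    apply pv_contains_eq
    rw [hmemH _, pv_exists_group _ "finance_function" ["expense", "expenses", "receipt", "receipts", "report", "reports", "invoice", "invoices", "cost", "costs", "payment", "payments", "budget", "budgets", "reimbursement", "reimbursements"] (by decide)]
    exact (List.any_eq_true).symm
  have hcm : PySem.Set.contains I "construction_domain" =
      ((List.any ["construction", "contractor", "contractors", "builder", "builders", "building", "jobsite", "civilengineering", "homebuilding"] fun term => PySem.Str.isIn term hay) &&
       (List.any ["construction", "contractor", "contractors", "builder", "builders", "building", "jobsite", "civilengineering", "homebuilding"] fun term => PySem.Str.isIn term tl)) := by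
    apply pv_contains_eq
    rw [hmemI _, pv_exists_group _ "construction_domain" ["construction", "contractor", "contractors", "builder", "builders", "building", "jobsite", "civilengineering", "homebuilding"] (by decide)]
    simp only [Bool.and_eq_true, List.any_eq_true]
  have hfm : PySem.Set.contains I "finance_function" =
      ((List.any ["expense", "expenses", "receipt", "receipts", "report", "reports", "invoice", "invoices", "cost", "costs", "payment", "payments", "budget", "budgets", "reimbursement", "reimbursements"] fun term => PySem.Str.isIn term hay) &&
       (List.any ["expense", "expenses", "receipt", "receipts", "report", "reports", "invoice", "invoices", "cost", "costs", "payment", "payments", "budget", "budgets", "reimbursement", "reimbursements"] fun term => PySem.Str.isIn term tl)) := by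
    apply pv_contains_eq
    rw [hmemI _, pv_exists_group _ "finance_function" ["expense", "expenses", "receipt", "receipts", "report", "reports", "invoice", "invoices", "cost", "costs", "payment", "payments", "budget", "budgets", "reimbursement", "reimbursements"] (by decide)]
    simp only [Bool.and_eq_true, List.any_eq_true]
  -- A-side: reorder the matched filter and resolve the two lookups
  have hflip : List.filter (fun a => (a.2.any fun term => PySem.Str.isIn term tl) &&
        a.2.any fun term => PySem.Str.isIn term hay) semanticGroups =
      List.filter (fun a => (a.2.any fun term => PySem.Str.isIn term hay) &&
        a.2.any fun term => PySem.Str.isIn term tl) semanticGroups :=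
    List.filter_congr (fun a _ => Bool.and_comm _ _)
  have hlc : List.lookup "construction_domain"
      (List.filter (fun x => x.2.any fun term => PySem.Str.isIn term hay) semanticGroups) =
      (if (List.any ["construction", "contractor", "contractors", "builder", "builders", "building", "jobsite", "civilengineering", "homebuilding"] fun term => PySem.Str.isIn term hay) = true then some ["construction", "contractor", "contractors", "builder", "builders", "building", "jobsite", "civilengineering", "homebuilding"] else none) :=
    pv_lookup_filter semanticGroups _ _ _ (by decide) (by decide)
  have hlf : List.lookup "finance_function"
      (List.filter (fun x => x.2.any fun term => PySem.Str.isIn term hay) semanticGroups) =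
      (if (List.any ["expense", "expenses", "receipt", "receipts", "report", "reports", "invoice", "invoices", "cost", "costs", "payment", "payments", "budget", "budgets", "reimbursement", "reimbursements"] fun term => PySem.Str.isIn term hay) = true then some ["expense", "expenses", "receipt", "receipts", "report", "reports", "invoice", "invoices", "cost", "costs", "payment", "payments", "budget", "budgets", "reimbursement", "reimbursements"] else none) :=
    pv_lookup_filter semanticGroups _ _ _ (by decide) (by decide)
  clear hmemI' hmemI hmemH hmemT hndI hndM
  clear hSH hST hI
  clear_value SH ST I
  rw [hflip, hlc, hlf, hlen, hca, hfa, hcm, hfm]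
  clear hca hfa hcm hfm hlc hlf hflip hlen
  clear I SH ST
  cases h1 : (List.any ["construction", "contractor", "contractors", "builder", "builders", "building", "jobsite", "civilengineering", "homebuilding"] fun term => PySem.Str.isIn term hay) <;>
    cases h2 : (List.any ["expense", "expenses", "receipt", "receipts", "report", "reports", "invoice", "invoices", "cost", "costs", "payment", "payments", "budget", "budgets", "reimbursement", "reimbursements"] fun term => PySem.Str.isIn term hay) <;>
      cases ht1 : (List.any ["construction", "contractor", "contractors", "builder", "builders", "building", "jobsite", "civilengineering", "homebuilding"] fun term => PySem.Str.isIn term tl) <;>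
        cases ht2 : (List.any ["expense", "expenses", "receipt", "receipts", "report", "reports", "invoice", "invoices", "cost", "costs", "payment", "payments", "budget", "budgets", "reimbursement", "reimbursements"] fun term => PySem.Str.isIn term tl) <;>
          simp only [h1, h2, ht1, ht2, Option.isSome_some, Option.isSome_none, Option.getD_some,
            Option.getD_none, Bool.true_and, Bool.false_and, Bool.and_true, Bool.and_false,
            Bool.not_true, Bool.not_false, Bool.false_eq_true, if_true, if_false]
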